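-- pv_equiv track=rewrite | github.com/ThomasPiergiovanni/AddressNormalizer | normalizer/controller.py | __build_name
-- ===== SOURCE A (Python) =====
-- def __build_name(name_list):
--     name_list_len = len(name_list)
--     if name_list_len > 0:
--         data = ''
--         counter = 1
--         for name in name_list:
--             if name and name_list_len > counter:
--                 data += name + ' '
--             if name and name_list_len == counter:
--                 data += name
--             counter += 1
--         return data
-- ===== SOURCE B (Python) =====
-- def __build_name(name_list):
--     if not name_list:
--         return None
--     return ' '.join(name for name in name_list if name)
-- ===== Notes on version B (the rewrite author's own statement) =====
-- stated objective: simpler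
-- what changed: Replaces the 1-indexed counter loop with position-dependent branches by a single truthiness filter plus str.join.
-- intended difference: When the last element is falsy (empty) but some element is truthy, A returns the joined names with a stray trailing space while B returns the clean space-joined names, which is the intended tidy result. — e.g. on __build_name(["a", ""]): A returns some "a ", B returns some "a"
import Mathlib
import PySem

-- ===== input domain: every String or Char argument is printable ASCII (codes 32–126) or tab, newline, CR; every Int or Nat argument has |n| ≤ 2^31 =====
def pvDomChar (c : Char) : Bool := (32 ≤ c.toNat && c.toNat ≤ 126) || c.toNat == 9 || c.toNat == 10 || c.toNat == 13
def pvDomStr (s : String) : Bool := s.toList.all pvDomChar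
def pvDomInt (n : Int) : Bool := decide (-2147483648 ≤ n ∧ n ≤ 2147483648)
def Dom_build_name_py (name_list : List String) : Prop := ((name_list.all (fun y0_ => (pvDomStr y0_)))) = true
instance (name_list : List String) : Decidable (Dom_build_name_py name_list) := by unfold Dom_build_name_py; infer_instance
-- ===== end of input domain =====

-- B replaces A's 1-indexed counter loop (which appends ' ' after every truthy
-- name except at the final index) by filter-truthy + ' '.join; B intentionally
-- drops A's stray trailing space when the last element is falsy (see D_ below).

-- ===== PORT A =====
-- one loop step of A: st = (data, counter); L = len(name_list)
def build_name_py_step (L : Nat) (st : String × Nat) (name : String) : String × Nat :=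
  let data := if name ≠ "" ∧ L > st.2 then st.1 ++ (name ++ " ") else st.1
  let data := if name ≠ "" ∧ L = st.2 then data ++ name else data
  (data, st.2 + 1)

def build_name_py (name_list : List String) : Option String :=
  if name_list.length > 0 then
    some (name_list.foldl (build_name_py_step name_list.length) ("", 1)).1
  else
    none

-- ===== PORT B =====
def build_name_py_alt (name_list : List String) : Option String :=
  if name_list = [] then none
  else some (PySem.Str.join " " (name_list.filter (fun n => n ≠ "")))

-- ===== PRECONDITION & SPEC =====
-- When the last element is falsy (empty) but some element is truthy, A returns the
-- joined truthy names with a stray trailing space; B returns the clean space-joined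
-- names, which is the intended result.
def D_build_name_py (name_list : List String) : Prop :=
  name_list.getLast? = some "" ∧ ∃ n ∈ name_list, n ≠ ""
instance (name_list : List String) : Decidable (D_build_name_py name_list) := by
  unfold D_build_name_py; infer_instance

def Spec_build_name_py (name_list : List String) (out : Option String) : Prop :=
  ¬ D_build_name_py name_list → out = build_name_py_alt name_list
instance (name_list : List String) (out : Option String) : Decidable (Spec_build_name_py name_list out) := by
  unfold Spec_build_name_py; infer_instance

def pvDiffWitness_build_name_py : List String := ["a", ""]
def pvDiffWitnessOut_build_name_py : (Option String) × (Option String) := (some "a ", some "a")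

-- ===== CLAIM =====
def Claim_unchanged_build_name_py : Prop := ∀ (name_list : List String), Dom_build_name_py name_list → Spec_build_name_py name_list (build_name_py name_list)
def Claim_changed_build_name_py : Prop := Dom_build_name_py (pvDiffWitness_build_name_py) ∧ D_build_name_py (pvDiffWitness_build_name_py) ∧ build_name_py (pvDiffWitness_build_name_py) = pvDiffWitnessOut_build_name_py.1 ∧ build_name_py_alt (pvDiffWitness_build_name_py) = pvDiffWitnessOut_build_name_py.2 ∧ pvDiffWitnessOut_build_name_py.1 ≠ pvDiffWitnessOut_build_name_py.2
def Claim_exact_build_name_py : Prop := ∀ (name_list : List String), Dom_build_name_py name_list → D_build_name_py name_list → build_name_py name_list ≠ build_name_py_alt name_list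

-- ===== LEMMAS AND PROOFS =====

-- A's result, characterised structurally: every truthy non-last name is followed
-- by a space, a truthy last name is not.
def pvRender : List String → String
  | [] => ""
  | [n] => n
  | n :: m :: t => (if n = "" then "" else n ++ " ") ++ pvRender (m :: t)

theorem pvFoldA_eq (l : List String) (L c : Nat) (d : String)
    (h : c + l.length = L + 1) :
    (l.foldl (build_name_py_step L) (d, c)).1 = d ++ pvRender l := by
  induction l generalizing c d with
  | nil => simp [pvRender]
  | cons n rest ih =>
    cases rest with
    | nil =>
      have hc : L = c := by simpa using h.symm
      by_cases hn : n = "" <;>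
        simp [build_name_py_step, pvRender, hn, hc]
    | cons m t =>
      have hgt : L > c := by simp at h; omega
      have hne : ¬(L = c) := by omega
      have h' : (c + 1) + (m :: t).length = L + 1 := by simp at h ⊢; omega
      have hstep : build_name_py_step L ((d, c) : String × Nat) n
          = ((if n = "" then d else d ++ (n ++ " ")), c + 1) := by
        by_cases hn : n = "" <;> simp [build_name_py_step, hn, hgt, hne]
      rw [List.foldl_cons, hstep, ih _ _ h', pvRender]
      by_cases hn : n = "" <;> simp [hn, String.append_assoc]

theorem pvA_render (l : List String) (hl : l ≠ []) :
    build_name_py l = some (pvRender l) := by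
  have hlen : 0 < l.length := List.length_pos_iff.mpr hl
  have := pvFoldA_eq l l.length 1 "" (by omega)
  simp [build_name_py, hlen, this]

theorem pvJoin_cons_cons (p q : String) (rest : List String) :
    PySem.Str.join " " (p :: q :: rest) = p ++ " " ++ PySem.Str.join " " (q :: rest) := by
  rw [← String.toList_inj]
  simp [PySem.Str.toList_join, PySem.Chars.join_cons_cons]

theorem pvRender_all_empty (l : List String) (h : ∀ n ∈ l, n = "") :
    pvRender l = "" := by
  induction l with
  | nil => rfl
  | cons n rest ih =>
    cases rest with
    | nil => exact h n (by simp)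
    | cons m t =>
      have hn : n = "" := h n (by simp)
      simp [pvRender, hn, ih (fun x hx => h x (by simp [hx]))]

theorem pvRender_last_truthy (l : List String) (x : String)
    (hx : l.getLast? = some x) (hxe : x ≠ "") :
    pvRender l = PySem.Str.join " " (l.filter (fun n => n ≠ "")) := by
  induction l with
  | nil => simp at hx
  | cons n rest ih =>
    cases rest with
    | nil =>
      have : n = x := by simpa using hx
      subst this
      simp [pvRender, List.filter, hxe, PySem.Str.join]
    | cons m t =>
      have hx' : (m :: t).getLast? = some x := by
        rw [List.getLast?_cons_cons] at hx; exact hx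
      have ihr := ih hx'
      have hmem : x ∈ (m :: t).filter (fun n => n ≠ "") := by
        refine List.mem_filter.mpr ⟨List.mem_of_getLast? hx', by simpa using hxe⟩
      by_cases hn : n = ""
      · simp [pvRender, hn, ihr, List.filter]
      · obtain ⟨f, fs, hf⟩ : ∃ f fs, (m :: t).filter (fun n => n ≠ "") = f :: fs := by
          cases hfl : (m :: t).filter (fun n => n ≠ "") with
          | nil => rw [hfl] at hmem; simp at hmem
          | cons f fs => exact ⟨f, fs, rfl⟩
        have : (n :: m :: t).filter (fun n => n ≠ "") = n :: f :: fs := by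
          rw [List.filter_cons_of_pos (by simpa using hn), hf]
        rw [pvRender, this, pvJoin_cons_cons, ← hf, ihr]
        simp [hn]

theorem pvRender_last_empty (l : List String)
    (hx : l.getLast? = some "")
    (hne : l.filter (fun n => n ≠ "") ≠ []) :
    pvRender l = PySem.Str.join " " (l.filter (fun n => n ≠ "")) ++ " " := by
  induction l with
  | nil => simp at hx
  | cons n rest ih =>
    cases rest with
    | nil =>
      have : n = "" := by simpa using hx
      subst this
      simp [List.filter] at hne
    | cons m t =>
      have hx' : (m :: t).getLast? = some "" := by
        rw [List.getLast?_cons_cons] at hx; exact hx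
      by_cases hn : n = ""
      · have hfe : (n :: m :: t).filter (fun n => n ≠ "") = (m :: t).filter (fun n => n ≠ "") := by
          rw [List.filter_cons_of_neg (by simpa using hn)]
        rw [hfe] at hne ⊢
        simp [pvRender, hn, ih hx' hne]
      · have hfe : (n :: m :: t).filter (fun n => n ≠ "") = n :: (m :: t).filter (fun n => n ≠ "") := by
          rw [List.filter_cons_of_pos (by simpa using hn)]
        cases hfl : (m :: t).filter (fun n => n ≠ "") with
        | nil =>
          have hall : ∀ x ∈ m :: t, x = "" := by
            intro x hxm
            by_contra hxe
            have : x ∈ (m :: t).filter (fun n => n ≠ "") :=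
              List.mem_filter.mpr ⟨hxm, by simpa using hxe⟩
            rw [hfl] at this; simp at this
          rw [pvRender, pvRender_all_empty _ hall, hfe, hfl]
          simp [hn, PySem.Str.join]
        | cons f fs =>
          have ihr := ih hx' (by rw [hfl]; simp)
          rw [pvRender, hfe, hfl, pvJoin_cons_cons, ← hfl, ihr]
          simp [hn, String.append_assoc]

theorem pvFilter_ne_nil (l : List String) (x : String) (hm : x ∈ l) (hx : x ≠ "") :
    l.filter (fun n => n ≠ "") ≠ [] := by
  intro h
  have : x ∈ l.filter (fun n => n ≠ "") := List.mem_filter.mpr ⟨hm, by simpa using hx⟩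
  rw [h] at this; simp at this

-- ===== VERDICT =====
theorem build_name_py_spec : Claim_unchanged_build_name_py := by
  intro l _ hnd
  cases l with
  | nil => rfl
  | cons a rest =>
    unfold D_build_name_py at hnd
    push Not at hnd
    rw [pvA_render (a :: rest) (by simp)]
    unfold build_name_py_alt
    simp only [if_neg (by simp : ¬(a :: rest = []))]
    obtain ⟨x, hx⟩ : ∃ x, (a :: rest).getLast? = some x := by
      cases hg : (a :: rest).getLast? with
      | none => rw [List.getLast?_eq_none_iff] at hg; simp at hg
      | some x => exact ⟨x, rfl⟩
    by_cases hxe : x = ""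
    · subst hxe
      have hall : ∀ n ∈ a :: rest, n = "" := by
        intro n hn
        by_contra hne
        exact hne (hnd hx n hn)
      rw [pvRender_all_empty _ hall,
        List.filter_eq_nil_iff.mpr (fun n hn => by simpa using hall n hn)]
      simp [PySem.Str.join]
    · rw [pvRender_last_truthy _ x hx hxe]

theorem build_name_py_changed : Claim_changed_build_name_py := by
  unfold Claim_changed_build_name_py; decide

theorem build_name_py_tight : Claim_exact_build_name_py := by
  intro l _ hd
  obtain ⟨hlast, x, hm, hx⟩ := hd
  have hl : l ≠ [] := by intro h; subst h; simp at hlast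
  have hne := pvFilter_ne_nil l x hm hx
  rw [pvA_render l hl]
  unfold build_name_py_alt
  simp only [if_neg hl]
  rw [pvRender_last_empty l hlast hne]
  intro h
  have := congrArg (fun o => (o.getD "").length) h
  simp at this
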